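-- pv_equiv track=rewrite | github.com/IagoAlm/DnD | funcDama.py | verJogadas
-- ===== SOURCE A (Python) =====
-- def verAcima(tabuleiro, linha, i):
--     esquerdaInt = False
--     direitaInt = False
--     if i-1 >= 0 and linha-1 >= 0 and tabuleiro[linha-1][i-1] == '.':
--         esquerdaInt = str(linha-1)
--         esquerdaInt = esquerdaInt + str(i-1)
--     if i+1 <= 7 and linha-1 >= 0 and tabuleiro[linha-1][i+1] == '.':
--         direitaInt = str(linha-1)
--         direitaInt = direitaInt + str(i+1)
--     # o retorno desses dados é 1 a mais na linha
--     if esquerdaInt and direitaInt: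
--         return (esquerdaInt, direitaInt)
--     elif direitaInt:
--         return (direitaInt,)
--     elif esquerdaInt:
--         return (esquerdaInt,)
--
-- def verAbaixo(tabuleiro, linha, i):
--     esquerdaInt = False
--     direitaInt = False
--     if i-1 >= 0 and linha+1 < 8 and tabuleiro[linha+1][i-1] == '.':
--         esquerdaInt = str(linha+1)
--         esquerdaInt = esquerdaInt + str(i-1)
--     if i+1 <= 7 and linha+1 < 8 and tabuleiro[linha+1][i+1] == '.':
--         direitaInt = str(linha+1)
--         direitaInt = direitaInt + str(i+1)
--     # o retorno desses dados é 1 a mais na linha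
--     if esquerdaInt and direitaInt:
--         return (esquerdaInt, direitaInt)
--     elif direitaInt:
--         return (direitaInt,)
--     elif esquerdaInt:
--         return (esquerdaInt,)
--
-- def verJogadas(tabuleiro, linha, jogador):
--     jogadas = dict()
--
--     for i in range(len(tabuleiro[linha])):
--         if tabuleiro[linha][i] == jogador:
--             if jogador == 'b':
--
--                 res = verAcima(tabuleiro, linha, i)
--             elif jogador == 'a':
--                 res = verAbaixo(tabuleiro, linha, i)
--             if res != None:
--                 jogadas[str(linha)+str(i)] = [x for x in res]
--
--         if tabuleiro[linha][i] == jogador.upper():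
--             resAcima = verAcima(tabuleiro, linha, i)
--             resAbaixo = verAbaixo(tabuleiro, linha, i)
--             if resAcima != None and resAbaixo != None:
--                 resTot = resAcima + resAbaixo
--             elif resAcima != None and resAbaixo == None:
--                 resTot = resAcima
--             elif resAbaixo != None and resAcima == None:
--                 resTot = resAbaixo
--             else:
--                 resTot = None
--             if resTot != None:
--                 jogadas[str(linha)+str(i)] = [x for x in resTot]
--     return jogadas
-- ===== SOURCE B (Python) =====
-- def verJogadas(tabuleiro, linha, jogador):
--     n = len(tabuleiro)
--     rows = ([linha - 1] if linha - 1 >= 0 else []) + ([linha + 1] if linha + 1 < 8 else [])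
--     # Stage 1: index every empty cell of the adjacent rows once: the empty cell (r, j)
--     # is a left-move for the piece in column j+1 and a right-move for the piece in column j-1.
--     pend = [(key, str(r) + str(j))
--             for r in rows if -n <= r < n
--             for j, cell in enumerate(tabuleiro[r]) if cell == '.'
--             for key in [(r, j + 1)] + ([(r, j - 1)] if 1 <= j <= 7 else [])]
--     lances = {}
--     for key, mv in pend:
--         lances.setdefault(key, []).append(mv)
--     # Stage 2: each piece just looks its moves up.
--     jogadas = {}
--     for i in range(len(tabuleiro[linha])):
--         cell = tabuleiro[linha][i]
--         if cell == jogador: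
--             alvos = [linha - 1] if jogador == 'b' else [linha + 1]
--         elif cell == jogador.upper():
--             alvos = [linha - 1, linha + 1]
--         else:
--             continue
--         movs = [m for r in alvos for m in lances.get((r, i), [])]
--         if movs:
--             jogadas[str(linha) + str(i)] = movs
--     return jogadas
-- ===== Notes on version B (the rewrite author's own statement) =====
-- stated objective: alternative
-- what changed: B inverts the scan: instead of probing each piece's two diagonal neighbours, it first indexes every empty cell of the two adjacent rows into a dict keyed by the column it is a move for (an empty cell (r,j) is a left-move for column j+1 and a right-move for column j-1), and each piece then just looks its move list up.
import Mathlib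
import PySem

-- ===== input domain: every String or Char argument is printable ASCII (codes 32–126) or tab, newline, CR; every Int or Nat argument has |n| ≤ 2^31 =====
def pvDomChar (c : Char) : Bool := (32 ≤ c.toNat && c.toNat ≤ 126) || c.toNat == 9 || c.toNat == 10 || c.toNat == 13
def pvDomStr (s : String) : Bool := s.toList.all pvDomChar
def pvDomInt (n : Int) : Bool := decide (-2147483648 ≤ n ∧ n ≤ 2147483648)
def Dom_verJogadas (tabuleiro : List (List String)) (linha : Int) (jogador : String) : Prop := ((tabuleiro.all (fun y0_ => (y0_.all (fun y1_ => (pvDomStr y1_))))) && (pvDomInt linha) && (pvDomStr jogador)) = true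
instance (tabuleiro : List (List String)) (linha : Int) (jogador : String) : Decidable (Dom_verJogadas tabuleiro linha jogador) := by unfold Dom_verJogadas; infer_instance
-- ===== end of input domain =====

-- B inverts the scan: instead of probing each piece's diagonal neighbours, it first indexes the
-- empty cells of the two adjacent rows into a dict keyed by the column they are a move for, and
-- each piece then just looks its move list up (objective: alternative); same return value on Pre_.

-- tabuleiro[r][j] with Python index semantics, defaulted (Pre_ guarantees the accesses A makes are in range)
def pvCellD (tabuleiro : List (List String)) (r j : Int) : String :=
  PySem.List.pyGetD (PySem.List.pyGetD tabuleiro r []) j ""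

-- ===== PORT A =====
def verAcima (tabuleiro : List (List String)) (linha : Int) (i : Int) : Option (List String) :=
  let esquerdaInt : Option String :=
    if i - 1 ≥ 0 ∧ linha - 1 ≥ 0 ∧ pvCellD tabuleiro (linha - 1) (i - 1) = "." then
      some (PySem.Int.toStr (linha - 1) ++ PySem.Int.toStr (i - 1))
    else none
  let direitaInt : Option String :=
    if i + 1 ≤ 7 ∧ linha - 1 ≥ 0 ∧ pvCellD tabuleiro (linha - 1) (i + 1) = "." then
      some (PySem.Int.toStr (linha - 1) ++ PySem.Int.toStr (i + 1))
    else none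
  match esquerdaInt, direitaInt with
  | some e, some d => some [e, d]
  | none,   some d => some [d]
  | some e, none   => some [e]
  | none,   none   => none

def verAbaixo (tabuleiro : List (List String)) (linha : Int) (i : Int) : Option (List String) :=
  let esquerdaInt : Option String :=
    if i - 1 ≥ 0 ∧ linha + 1 < 8 ∧ pvCellD tabuleiro (linha + 1) (i - 1) = "." then
      some (PySem.Int.toStr (linha + 1) ++ PySem.Int.toStr (i - 1))
    else none
  let direitaInt : Option String :=
    if i + 1 ≤ 7 ∧ linha + 1 < 8 ∧ pvCellD tabuleiro (linha + 1) (i + 1) = "." then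
      some (PySem.Int.toStr (linha + 1) ++ PySem.Int.toStr (i + 1))
    else none
  match esquerdaInt, direitaInt with
  | some e, some d => some [e, d]
  | none,   some d => some [d]
  | some e, none   => some [e]
  | none,   none   => none

def verJogadas (tabuleiro : List (List String)) (linha : Int) (jogador : String) : List (String × List String) :=
  let row := PySem.List.pyGetD tabuleiro linha []
  let jogadas : PySem.Dict String (List String) :=
    (List.range row.length).foldl (fun jogadas (i : Nat) =>
      let cell := PySem.List.pyGetD row (i : Int) ""
      let jogadas :=
        if cell = jogador then
          let res : Option (List String) :=
            if jogador = "b" then verAcima tabuleiro linha (i : Int)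
            else if jogador = "a" then verAbaixo tabuleiro linha (i : Int)
            else none  -- Python: `res` is unbound here (UnboundLocalError); excluded by Pre_
          match res with
          | some r => jogadas.insert (PySem.Int.toStr linha ++ PySem.Int.toStr (i : Int)) r
          | none   => jogadas
        else jogadas
      if cell = PySem.Str.upper jogador then
        let resAcima := verAcima tabuleiro linha (i : Int)
        let resAbaixo := verAbaixo tabuleiro linha (i : Int)
        let resTot : Option (List String) :=
          match resAcima, resAbaixo with
          | some x, some y => some (x ++ y)
          | some x, none   => some x
          | none,   some y => some y
          | none,   none   => none
        match resTot with
        | some r => jogadas.insert (PySem.Int.toStr linha ++ PySem.Int.toStr (i : Int)) r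
        | none   => jogadas
      else jogadas) PySem.Dict.empty
  jogadas.items

-- ===== PORT B =====
-- stage 1 of Source B, for one adjacent row r: the pending (key, move) pairs its empty cells generate
-- (the empty cell (r, j) is a left-move for column j+1 and a right-move for column j-1)
def pvPendRow (tabuleiro : List (List String)) (n r : Int) : List ((Int × Int) × String) :=
  if -n ≤ r ∧ r < n then
    (PySem.List.enumerate (PySem.List.pyGetD tabuleiro r [])).flatMap (fun p =>
      if p.2 = "." then
        ((r, p.1 + 1), PySem.Int.toStr r ++ PySem.Int.toStr p.1) ::
        (if 1 ≤ p.1 ∧ p.1 ≤ 7 then [((r, p.1 - 1), PySem.Int.toStr r ++ PySem.Int.toStr p.1)] else [])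
      else [])
  else []

def verJogadas_alt (tabuleiro : List (List String)) (linha : Int) (jogador : String) : List (String × List String) :=
  let n : Int := (tabuleiro.length : Int)
  let rows : List Int :=
    (if linha - 1 ≥ 0 then [linha - 1] else []) ++ (if linha + 1 < 8 then [linha + 1] else [])
  let pend := rows.flatMap (pvPendRow tabuleiro n)
  let lances : PySem.Dict (Int × Int) (List String) :=
    pend.foldl (fun d p => d.modify p.1 [] (· ++ [p.2])) PySem.Dict.empty
  let jogadas : PySem.Dict String (List String) :=
    (List.range (PySem.List.pyGetD tabuleiro linha []).length).foldl (fun jogadas (i : Nat) =>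
      let cell := PySem.List.pyGetD (PySem.List.pyGetD tabuleiro linha []) (i : Int) ""
      match (if cell = jogador then some (if jogador = "b" then [linha - 1] else [linha + 1])
             else if cell = PySem.Str.upper jogador then some [linha - 1, linha + 1]
             else none : Option (List Int)) with
      | none => jogadas  -- continue
      | some alvos =>
        let movs : List String := alvos.flatMap (fun r => lances.getD (r, (i : Int)) [])
        if movs ≠ [] then jogadas.insert (PySem.Int.toStr linha ++ PySem.Int.toStr (i : Int)) movs
        else jogadas) PySem.Dict.empty
  jogadas.items

-- ===== PRECONDITION & SPEC =====
-- in-range test for the board access tabuleiro[r][j] (Python index semantics on r; 0 ≤ j always at use sites)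
def pvCellOk (tabuleiro : List (List String)) (r j : Int) : Bool :=
  ((PySem.List.pyGet? tabuleiro r).bind (fun rw => PySem.List.pyGet? rw j)).isSome

-- Pre_ = exactly the inputs on which the Python A returns: the row index is valid, no cell equal to
-- `jogador` with jogador ∉ {"a","b"} (there A reads the unbound local `res` → UnboundLocalError), and
-- every diagonal access A's guards let it attempt is in range (else IndexError).
def Pre_verJogadas (tabuleiro : List (List String)) (linha : Int) (jogador : String) : Prop :=
  (PySem.List.pyGet? tabuleiro linha).isSome ∧
  (∀ i ∈ List.range (PySem.List.pyGetD tabuleiro linha []).length,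
    let cell := (PySem.List.pyGetD tabuleiro linha []).getD i ""
    ¬(cell = jogador ∧ jogador ≠ "a" ∧ jogador ≠ "b") ∧
    (((cell = jogador ∧ jogador = "b") ∨ cell = PySem.Str.upper jogador) →
       (((i : Int) - 1 ≥ 0 ∧ linha - 1 ≥ 0) → pvCellOk tabuleiro (linha - 1) ((i : Int) - 1) = true) ∧
       (((i : Int) + 1 ≤ 7 ∧ linha - 1 ≥ 0) → pvCellOk tabuleiro (linha - 1) ((i : Int) + 1) = true)) ∧
    (((cell = jogador ∧ jogador = "a") ∨ cell = PySem.Str.upper jogador) →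
       (((i : Int) - 1 ≥ 0 ∧ linha + 1 < 8) → pvCellOk tabuleiro (linha + 1) ((i : Int) - 1) = true) ∧
       (((i : Int) + 1 ≤ 7 ∧ linha + 1 < 8) → pvCellOk tabuleiro (linha + 1) ((i : Int) + 1) = true)))

instance (tabuleiro : List (List String)) (linha : Int) (jogador : String) : Decidable (Pre_verJogadas tabuleiro linha jogador) := by
  unfold Pre_verJogadas; infer_instance

def pvWitness_verJogadas : List (List String) × Int × String :=
  ([["a", ".", "b", "."], [".", ".", ".", "."]], 0, "b")

def Spec_verJogadas (tabuleiro : List (List String)) (linha : Int) (jogador : String) (out : List (String × List String)) : Prop := out = verJogadas_alt tabuleiro linha jogador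
instance (tabuleiro : List (List String)) (linha : Int) (jogador : String) (out : List (String × List String)) : Decidable (Spec_verJogadas tabuleiro linha jogador out) := by unfold Spec_verJogadas; infer_instance

-- ===== CLAIM (what is proved, stated in full; the proofs are below) =====
def Claim_equal_verJogadas : Prop := ∀ (tabuleiro : List (List String)) (linha : Int) (jogador : String), Dom_verJogadas tabuleiro linha jogador → Pre_verJogadas tabuleiro linha jogador → Spec_verJogadas tabuleiro linha jogador (verJogadas tabuleiro linha jogador)

-- ===== LEMMAS AND PROOFS =====

-- the move list an Option result of verAcima/verAbaixo denotes ([] for none)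
def pvOL : Option (List String) → List String
  | none => []
  | some l => l

theorem pvPendRow_fst {tabuleiro : List (List String)} {n r : Int} {p : (Int × Int) × String}
    (hp : p ∈ pvPendRow tabuleiro n r) : p.1.1 = r := by
  unfold pvPendRow at hp
  split at hp
  · rw [List.mem_flatMap] at hp
    obtain ⟨q, -, hpq⟩ := hp
    split at hpq
    · simp only [List.mem_cons] at hpq
      rcases hpq with rfl | hpq
      · rfl
      · split at hpq <;> simp_all
    · simp at hpq
  · simp at hp

theorem pvFilter_ne (tabuleiro : List (List String)) (n r r0 t : Int) (h : r ≠ r0) :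
    ((pvPendRow tabuleiro n r).filter (fun p => p.1 == (r0, t))).map (·.2) = [] := by
  have : (pvPendRow tabuleiro n r).filter (fun p => p.1 == (r0, t)) = [] := by
    rw [List.filter_eq_nil_iff]
    intro p hp
    have hf := pvPendRow_fst hp
    simp only [beq_iff_eq]
    intro he
    exact h (by rw [← hf, he])
  rw [this, List.map_nil]

theorem pvOut_empty (tabuleiro : List (List String)) (r : Int)
    (h : ¬(-(tabuleiro.length : Int) ≤ r ∧ r < (tabuleiro.length : Int))) :
    PySem.List.pyGetD tabuleiro r ([] : List String) = [] := by
  have hn : PySem.List.pyGet? tabuleiro r = none := by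
    rw [PySem.List.pyGet?_eq_none_iff]
    simpa [PySem.Raise.InRange] using h
  simp [PySem.List.pyGetD, hn]

theorem pvFlatMap_range_ipair {α : Type} (G : Nat → List α) (n i : Nat)
    (h : ∀ k : Nat, ((k : Int) ≠ (i : Int) - 1) → (k ≠ i + 1) → G k = []) :
    (List.range n).flatMap G =
      (if 1 ≤ i ∧ i - 1 < n then G (i - 1) else []) ++ (if i + 1 < n then G (i + 1) else []) := by
  induction n with
  | zero => simp
  | succ n ih =>
    rw [List.range_succ, List.flatMap_append, ih]
    simp only [List.flatMap_cons, List.flatMap_nil, List.append_nil]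
    by_cases h1 : 1 ≤ i ∧ n = i - 1
    · obtain ⟨hi, rfl⟩ := h1
      rw [if_neg (show ¬(1 ≤ i ∧ i - 1 < i - 1) by omega),
          if_neg (show ¬ i + 1 < i - 1 by omega),
          if_pos (show 1 ≤ i ∧ i - 1 < i - 1 + 1 by omega),
          if_neg (show ¬ i + 1 < i - 1 + 1 by omega)]
      simp
    · by_cases h2 : n = i + 1
      · subst h2
        by_cases hi : 1 ≤ i
        · rw [if_pos (show 1 ≤ i ∧ i - 1 < i + 1 by omega),
              if_neg (show ¬ i + 1 < i + 1 by omega),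
              if_pos (show 1 ≤ i ∧ i - 1 < i + 1 + 1 by omega),
              if_pos (show i + 1 < i + 1 + 1 by omega)]
          simp
        · have hi0 : i = 0 := by omega
          subst hi0
          simp
      · have hGn : G n = [] := h n (by omega) h2
        rw [hGn]
        have e1 : (1 ≤ i ∧ i - 1 < n) ↔ (1 ≤ i ∧ i - 1 < n + 1) := by
          constructor <;> intro <;> omega
        have e2 : (i + 1 < n) ↔ (i + 1 < n + 1) := by
          constructor <;> intro <;> omega
        simp only [List.append_nil, e1, e2]

theorem pvRow_filter (tabuleiro : List (List String)) (r : Int) (i : Nat) :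
    ((pvPendRow tabuleiro (tabuleiro.length : Int) r).filter (fun p => p.1 == (r, (i : Int)))).map (·.2) =
      (if (i : Int) - 1 ≥ 0 ∧ pvCellD tabuleiro r ((i : Int) - 1) = "." then
         [PySem.Int.toStr r ++ PySem.Int.toStr ((i : Int) - 1)] else []) ++
      (if (i : Int) + 1 ≤ 7 ∧ pvCellD tabuleiro r ((i : Int) + 1) = "." then
         [PySem.Int.toStr r ++ PySem.Int.toStr ((i : Int) + 1)] else []) := by
  unfold pvPendRow
  by_cases hr : -((tabuleiro.length : Nat) : Int) ≤ r ∧ r < ((tabuleiro.length : Nat) : Int)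
  case neg =>
    have h0 : PySem.List.pyGetD tabuleiro r ([] : List String) = [] := pvOut_empty _ _ hr
    rw [if_neg hr]
    have hcell : ∀ j : Int, pvCellD tabuleiro r j = "" := fun j => by
      rw [pvCellD, h0]; simp [PySem.List.pyGetD, PySem.List.pyGet?, PySem.List.pyIdx?]
    rw [if_neg (by rw [hcell]; rintro ⟨-, h⟩; exact absurd h (by decide)),
        if_neg (by rw [hcell]; rintro ⟨-, h⟩; exact absurd h (by decide))]
    simp
  case pos =>
    rw [if_pos hr]
    rw [PySem.List.enumerate_eq_map_pyRange _ "", PySem.List.len_eq,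
        PySem.List.pyRange_zero_natCast, List.map_map, List.flatMap_map, List.filter_flatMap,
        List.map_flatMap]
    refine (pvFlatMap_range_ipair _ _ i ?_).trans ?_
    · intro k hk1 hk2
      have hk2' : ((k : Int)) ≠ (i : Int) + 1 := by omega
      dsimp only [Function.comp]
      split_ifs with hc hg
      · have e1 : ((r, (k : Int) + 1) == (r, (i : Int))) = false := by
          simp only [beq_eq_false_iff_ne, ne_eq, Prod.mk.injEq, true_and]; omega
        have e2 : ((r, (k : Int) - 1) == (r, (i : Int))) = false := by
          simp only [beq_eq_false_iff_ne, ne_eq, Prod.mk.injEq, true_and]; omega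
        simp [e1, e2]
      · have e1 : ((r, (k : Int) + 1) == (r, (i : Int))) = false := by
          simp only [beq_eq_false_iff_ne, ne_eq, Prod.mk.injEq, true_and]; omega
        simp [e1]
      · simp
    · congr 1
      · -- left slot
        by_cases hi : 1 ≤ i
        · have ec : (((i - 1 : Nat)) : Int) = (i : Int) - 1 := by omega
          by_cases hlt : i - 1 < (PySem.List.pyGetD tabuleiro r ([] : List String)).length
          · rw [if_pos ⟨hi, hlt⟩]
            simp only [Function.comp, ec, pvCellD]
            have e1 : ((r, (i : Int) - 1 + 1) == (r, (i : Int))) = true := by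
              simp only [beq_iff_eq, Prod.mk.injEq, true_and]; omega
            have e2 : ((r, (i : Int) - 1 - 1) == (r, (i : Int))) = false := by
              simp only [beq_eq_false_iff_ne, ne_eq, Prod.mk.injEq, true_and]; omega
            by_cases hc : PySem.List.pyGetD (PySem.List.pyGetD tabuleiro r []) ((i : Int) - 1) "" = "."
            · rw [if_pos hc,
                  if_pos (show (i : Int) - 1 ≥ 0 ∧
                    PySem.List.pyGetD (PySem.List.pyGetD tabuleiro r []) ((i : Int) - 1) "" = "."
                    from ⟨by omega, hc⟩)]
              by_cases hg : 1 ≤ (i : Int) - 1 ∧ (i : Int) - 1 ≤ 7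
              · rw [if_pos hg]; simp [e2]
              · rw [if_neg hg]; simp
            · rw [if_neg hc, if_neg (fun h => hc h.2)]
              simp
          · rw [if_neg (by tauto)]
            have hd : pvCellD tabuleiro r ((i : Int) - 1) = "" := by
              rw [pvCellD, ← ec, PySem.List.pyGetD_natCast]
              exact List.getD_eq_default _ _ (by omega)
            rw [if_neg (by rw [hd]; rintro ⟨-, h⟩; exact absurd h (by decide))]
        · rw [if_neg (by tauto), if_neg (by rintro ⟨h, -⟩; omega)]
      · -- right slot
        have ec : (((i + 1 : Nat)) : Int) = (i : Int) + 1 := by omega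
        by_cases hlt : i + 1 < (PySem.List.pyGetD tabuleiro r ([] : List String)).length
        · rw [if_pos hlt]
          simp only [Function.comp, ec, pvCellD]
          have e1 : ((r, (i : Int) + 1 + 1) == (r, (i : Int))) = false := by
            simp only [beq_eq_false_iff_ne, ne_eq, Prod.mk.injEq, true_and]; omega
          have e2 : ((r, (i : Int) + 1 - 1) == (r, (i : Int))) = true := by
            simp only [beq_iff_eq, Prod.mk.injEq, true_and]; omega
          by_cases hc : PySem.List.pyGetD (PySem.List.pyGetD tabuleiro r []) ((i : Int) + 1) "" = "."
          · rw [if_pos hc]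
            by_cases h7 : (i : Int) + 1 ≤ 7
            · rw [if_pos (show 1 ≤ (i : Int) + 1 ∧ (i : Int) + 1 ≤ 7 from ⟨by omega, h7⟩),
                  if_pos (show (i : Int) + 1 ≤ 7 ∧
                    PySem.List.pyGetD (PySem.List.pyGetD tabuleiro r []) ((i : Int) + 1) "" = "."
                    from ⟨h7, hc⟩)]
              simp [e1]
            · rw [if_neg (fun h => h7 h.2), if_neg (fun h => h7 h.1)]
              simp
              omega
          · rw [if_neg hc, if_neg (fun h => hc h.2)]
            simp
        · rw [if_neg hlt]
          have hd : pvCellD tabuleiro r ((i : Int) + 1) = "" := by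
            rw [pvCellD, ← ec, PySem.List.pyGetD_natCast]
            exact List.getD_eq_default _ _ (by omega)
          rw [if_neg (by rw [hd]; rintro ⟨-, h⟩; exact absurd h (by decide))]

theorem pvLookup_up (tabuleiro : List (List String)) (linha : Int) (i : Nat) :
    ((((if linha - 1 ≥ 0 then [linha - 1] else []) ++ (if linha + 1 < 8 then [linha + 1] else [])).flatMap
        (pvPendRow tabuleiro (tabuleiro.length : Int))).foldl
        (fun d p => d.modify p.1 [] (· ++ [p.2])) PySem.Dict.empty).getD (linha - 1, (i : Int)) [] =
      pvOL (verAcima tabuleiro linha (i : Int)) := by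
  rw [PySem.Dict.getD_foldl_modify_append, PySem.Dict.getD_empty, List.nil_append,
      List.flatMap_append, List.filter_append, List.map_append]
  have hdn : (((if linha + 1 < 8 then [linha + 1] else []).flatMap
      (pvPendRow tabuleiro (tabuleiro.length : Int))).filter
        (fun p => p.1 == (linha - 1, (i : Int)))).map (·.2) = [] := by
    split_ifs
    · simp only [List.flatMap_cons, List.flatMap_nil, List.append_nil]
      exact pvFilter_ne _ _ _ _ _ (by omega)
    · simp
  rw [hdn, List.append_nil]
  by_cases hu : linha - 1 ≥ 0
  · rw [if_pos hu]
    simp only [List.flatMap_cons, List.flatMap_nil, List.append_nil]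
    rw [pvRow_filter]
    unfold verAcima
    by_cases c1 : (i : Int) - 1 ≥ 0 ∧ pvCellD tabuleiro (linha - 1) ((i : Int) - 1) = "." <;>
      by_cases c2 : (i : Int) + 1 ≤ 7 ∧ pvCellD tabuleiro (linha - 1) ((i : Int) + 1) = "." <;>
        [rw [if_pos c1, if_pos c2, if_pos ⟨c1.1, hu, c1.2⟩, if_pos ⟨c2.1, hu, c2.2⟩];
         rw [if_pos c1, if_neg c2, if_pos ⟨c1.1, hu, c1.2⟩,
             if_neg (fun h => c2 ⟨h.1, h.2.2⟩)];
         rw [if_neg c1, if_pos c2, if_neg (fun h => c1 ⟨h.1, h.2.2⟩), if_pos ⟨c2.1, hu, c2.2⟩];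
         rw [if_neg c1, if_neg c2, if_neg (fun h => c1 ⟨h.1, h.2.2⟩),
             if_neg (fun h => c2 ⟨h.1, h.2.2⟩)]] <;>
      simp [pvOL]
  · rw [if_neg hu]
    have : verAcima tabuleiro linha (i : Int) = none := by
      unfold verAcima
      rw [if_neg (fun h => hu h.2.1), if_neg (fun h => hu h.2.1)]
    rw [this]
    simp [pvOL]

theorem pvLookup_down (tabuleiro : List (List String)) (linha : Int) (i : Nat) :
    ((((if linha - 1 ≥ 0 then [linha - 1] else []) ++ (if linha + 1 < 8 then [linha + 1] else [])).flatMap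
        (pvPendRow tabuleiro (tabuleiro.length : Int))).foldl
        (fun d p => d.modify p.1 [] (· ++ [p.2])) PySem.Dict.empty).getD (linha + 1, (i : Int)) [] =
      pvOL (verAbaixo tabuleiro linha (i : Int)) := by
  rw [PySem.Dict.getD_foldl_modify_append, PySem.Dict.getD_empty, List.nil_append,
      List.flatMap_append, List.filter_append, List.map_append]
  have hup : (((if linha - 1 ≥ 0 then [linha - 1] else []).flatMap
      (pvPendRow tabuleiro (tabuleiro.length : Int))).filter
        (fun p => p.1 == (linha + 1, (i : Int)))).map (·.2) = [] := by
    split_ifs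
    · simp only [List.flatMap_cons, List.flatMap_nil, List.append_nil]
      exact pvFilter_ne _ _ _ _ _ (by omega)
    · simp
  rw [hup, List.nil_append]
  by_cases hd : linha + 1 < 8
  · rw [if_pos hd]
    simp only [List.flatMap_cons, List.flatMap_nil, List.append_nil]
    rw [pvRow_filter]
    unfold verAbaixo
    by_cases c1 : (i : Int) - 1 ≥ 0 ∧ pvCellD tabuleiro (linha + 1) ((i : Int) - 1) = "." <;>
      by_cases c2 : (i : Int) + 1 ≤ 7 ∧ pvCellD tabuleiro (linha + 1) ((i : Int) + 1) = "." <;>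
        [rw [if_pos c1, if_pos c2, if_pos ⟨c1.1, hd, c1.2⟩, if_pos ⟨c2.1, hd, c2.2⟩];
         rw [if_pos c1, if_neg c2, if_pos ⟨c1.1, hd, c1.2⟩,
             if_neg (fun h => c2 ⟨h.1, h.2.2⟩)];
         rw [if_neg c1, if_pos c2, if_neg (fun h => c1 ⟨h.1, h.2.2⟩), if_pos ⟨c2.1, hd, c2.2⟩];
         rw [if_neg c1, if_neg c2, if_neg (fun h => c1 ⟨h.1, h.2.2⟩),
             if_neg (fun h => c2 ⟨h.1, h.2.2⟩)]] <;>
      simp [pvOL]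
  · rw [if_neg hd]
    have : verAbaixo tabuleiro linha (i : Int) = none := by
      unfold verAbaixo
      rw [if_neg (fun h => hd h.2.1), if_neg (fun h => hd h.2.1)]
    rw [this]
    simp [pvOL]

theorem pvAcima_ne_nil (tabuleiro : List (List String)) (linha i : Int) :
    verAcima tabuleiro linha i ≠ some [] := by
  unfold verAcima; split_ifs <;> simp

theorem pvAbaixo_ne_nil (tabuleiro : List (List String)) (linha i : Int) :
    verAbaixo tabuleiro linha i ≠ some [] := by
  unfold verAbaixo; split_ifs <;> simp

-- one loop iteration of port A equals one of port B, with the two dict lookups L already characterised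
theorem pvStep_eq (linha : Int) (jogador cell key : String)
    (hcrash : ¬(cell = jogador ∧ jogador ≠ "a" ∧ jogador ≠ "b"))
    (oU oD : Option (List String)) (hU : oU ≠ some []) (hD : oD ≠ some [])
    (L : Int → List String) (hLu : L (linha - 1) = pvOL oU) (hLd : L (linha + 1) = pvOL oD)
    (d : PySem.Dict String (List String)) :
    (let jog1 :=
      if cell = jogador then
        match (if jogador = "b" then oU else if jogador = "a" then oD else none) with
        | some r => d.insert key r
        | none   => d
      else d
    if cell = PySem.Str.upper jogador then
      match (match oU, oD with
             | some x, some y => some (x ++ y)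
             | some x, none   => some x
             | none,   some y => some y
             | none,   none   => none) with
      | some r => jog1.insert key r
      | none   => jog1
    else jog1) =
    (match (if cell = jogador then some (if jogador = "b" then [linha - 1] else [linha + 1])
            else if cell = PySem.Str.upper jogador then some [linha - 1, linha + 1]
            else none : Option (List Int)) with
     | none => d
     | some alvos =>
       let movs : List String := alvos.flatMap L
       if movs ≠ [] then d.insert key movs
       else d) := by
  by_cases h1 : cell = jogador
  · have hab : jogador = "a" ∨ jogador = "b" := by tauto
    rcases hab with rfl | rfl
    · subst h1
      simp only [if_neg (show ¬("a" : String) = "b" by decide),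
        if_neg (show ¬("a" : String) = PySem.Str.upper "a" by decide)]
      cases oD with
      | none => simp [hLd, pvOL]
      | some l =>
        have hl : l ≠ [] := fun e => hD (by rw [e])
        simp [hLd, pvOL, hl]
    · subst h1
      simp only [if_neg (show ¬("b" : String) = PySem.Str.upper "b" by decide)]
      cases oU with
      | none => simp [hLu, pvOL]
      | some l =>
        have hl : l ≠ [] := fun e => hU (by rw [e])
        simp [hLu, pvOL, hl]
  · by_cases h2 : cell = PySem.Str.upper jogador
    · simp only [if_neg h1, if_pos h2]
      cases oU with
      | none =>
        cases oD with
        | none => simp [hLu, hLd, pvOL]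
        | some l =>
          have hl : l ≠ [] := fun e => hD (by rw [e])
          simp [hLu, hLd, pvOL, hl]
      | some l =>
        have hl : l ≠ [] := fun e => hU (by rw [e])
        cases oD with
        | none => simp [hLu, hLd, pvOL, hl]
        | some m =>
          have hlm : l ++ m ≠ [] := by simp [hl]
          simp [hLu, hLd, pvOL, hlm]
    · simp [h1, h2]

-- ===== VERDICT (by name: the statement is the Claim_ definition above) =====
set_option maxHeartbeats 1000000 in
theorem verJogadas_spec : Claim_equal_verJogadas := by
  intro tabuleiro linha jogador _ hpre
  unfold Spec_verJogadas verJogadas verJogadas_alt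
  obtain ⟨-, hall⟩ := hpre
  refine congrArg PySem.Dict.items ?_
  apply PySem.List.foldl_congr_mem
  intro acc x hx
  have hc := (hall x hx).1
  rw [← PySem.List.pyGetD_natCast _ _ ""] at hc
  exact pvStep_eq linha jogador _ _ hc
    (verAcima tabuleiro linha (x : Int)) (verAbaixo tabuleiro linha (x : Int))
    (pvAcima_ne_nil _ _ _) (pvAbaixo_ne_nil _ _ _)
    (fun r => ((((if linha - 1 ≥ 0 then [linha - 1] else []) ++ (if linha + 1 < 8 then [linha + 1] else [])).flatMap
        (pvPendRow tabuleiro (tabuleiro.length : Int))).foldl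
        (fun d p => d.modify p.1 [] (· ++ [p.2])) PySem.Dict.empty).getD (r, (x : Int)) [])
    (pvLookup_up tabuleiro linha x) (pvLookup_down tabuleiro linha x) acc
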